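-- pv_equiv track=rewrite | github.com/yhleeeyenix/iputil | iputil/IPC_Tool/IPC_Search_Tool.py | validate_netmask
-- ===== SOURCE A (Python) =====
-- def validate_netmask(netmask):
--     try:
--         octets = netmask.split('.')
--
--         if len(octets) != 4:
--             return False
--
--         for octet in octets:
--             if not 0 <= int(octet) <= 255:
--                 return False
--
--         binary_str = ''.join(f'{int(octet):08b}' for octet in octets)
--
--         if '01' in binary_str:
--             return False
--
--         return True
--
--     except ValueError:
--         return False
-- ===== SOURCE B (Python) =====
-- def validate_netmask(netmask):
--     octets = netmask.split('.')
--     if len(octets) != 4: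
--         return False
--     m = 0
--     for octet in octets:
--         try:
--             value = int(octet)
--         except ValueError:
--             return False
--         if not 0 <= value <= 255:
--             return False
--         m = (m << 8) | value
--     w = ~m & 0xFFFFFFFF
--     return (w & (w + 1)) == 0
-- ===== Notes on version B (the rewrite author's own statement) =====
-- stated objective: alternative
-- what changed: After the same split/length/range checks, B packs the four octets into one 32-bit integer and tests mask contiguity with the closed-form wildcard test (w & (w+1)) == 0, instead of building a 32-character binary string and scanning it for a zero followed by a one.
import Mathlib
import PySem

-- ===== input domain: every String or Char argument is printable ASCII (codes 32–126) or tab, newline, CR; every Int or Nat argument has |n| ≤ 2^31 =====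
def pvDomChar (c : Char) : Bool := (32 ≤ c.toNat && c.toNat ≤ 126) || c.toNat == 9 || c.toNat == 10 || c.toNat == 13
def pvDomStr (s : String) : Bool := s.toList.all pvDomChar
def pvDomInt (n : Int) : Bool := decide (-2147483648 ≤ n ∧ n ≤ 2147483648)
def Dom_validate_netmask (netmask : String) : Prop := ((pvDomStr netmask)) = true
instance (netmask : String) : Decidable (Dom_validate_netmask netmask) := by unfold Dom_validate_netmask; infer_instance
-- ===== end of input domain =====

-- B replaces A's binary-string build and zero-then-one substring scan by the closed-form
-- wildcard bit test (w & (w+1)) == 0 on the packed 32-bit mask (objective: alternative).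

-- ===== PORT A =====

-- f'{v:08b}' : ported by hand via toBin+zfill; exact for 0 <= v (as here: v is range-checked first)
def pvFmt8 (v : Int) : String := PySem.Str.zfill (PySem.Int.toBin v) 8

-- the first for-loop: none = ValueError, some false = early 'return False', some true = loop completed
def pvARange : List String → Option Bool
  | [] => some true
  | o :: rest =>
    match PySem.Int.ofStr? o with
    | none => none
    | some v => if ¬(0 ≤ v ∧ v ≤ 255) then some false else pvARange rest

def validate_netmask (netmask : String) : Bool :=
  match PySem.Str.split? netmask "." with
  | none => false  -- unreachable: the separator "." is nonempty
  | some octets =>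
    if octets.length ≠ 4 then false
    else
      match pvARange octets with
      | none => false
      | some false => false
      | some true =>
        match octets.mapM PySem.Int.ofStr? with
        | none => false
        | some vs =>
          let binary_str := PySem.Str.join "" (vs.map pvFmt8)
          if PySem.Str.isIn "01" binary_str then false else true

-- ===== PORT B =====

-- B's single loop: parse, range-check and pack each octet; none = 'return False'
def pvBAcc : List String → Int → Option Int
  | [], m => some m
  | o :: rest, m =>
    match PySem.Int.ofStr? o with
    | none => none
    | some v =>
      if ¬(0 ≤ v ∧ v ≤ 255) then none
      else pvBAcc rest (PySem.Int.bor (m <<< (8 : Nat)) v)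

def validate_netmask_alt (netmask : String) : Bool :=
  match PySem.Str.split? netmask "." with
  | none => false  -- unreachable: the separator "." is nonempty
  | some octets =>
    if octets.length ≠ 4 then false
    else
      match pvBAcc octets 0 with
      | none => false
      | some m =>
        let w := PySem.Int.band (Int.not m) 4294967295
        PySem.Int.band w (w + 1) == 0

-- ===== PRECONDITION & SPEC =====
def Spec_validate_netmask (netmask : String) (out : Bool) : Prop := out = validate_netmask_alt netmask
instance (netmask : String) (out : Bool) : Decidable (Spec_validate_netmask netmask out) := by unfold Spec_validate_netmask; infer_instance

-- ===== CLAIM (what is proved, stated in full; the proofs are below) =====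
def Claim_equal_validate_netmask : Prop := ∀ (netmask : String), Dom_validate_netmask netmask → Spec_validate_netmask netmask (validate_netmask netmask)

-- ===== LEMMAS AND PROOFS =====

theorem pvTB_hi (x j : Nat) : x.testBit (8 + j) = (x / 256).testBit j := by
  have h : x / 256 = x >>> 8 := by simp [Nat.shiftRight_eq_div_pow]
  rw [h, Nat.testBit_shiftRight]

theorem pvTB_sum (p v i : Nat) (hv : v < 256) :
    (p * 256 + v).testBit i = if i < 8 then v.testBit i else p.testBit (i - 8) := by
  by_cases h : i < 8
  · simp only [h, if_true]
    interval_cases i <;>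
      · rw [Nat.testBit_eq_decide_div_mod_eq, Nat.testBit_eq_decide_div_mod_eq]
        norm_num
        omega
  · simp only [h, if_false]
    have hj : i = 8 + (i - 8) := by omega
    rw [hj]
    have h8 : 8 + (i - 8) - 8 = i - 8 := by omega
    rw [pvTB_hi]
    have : (p * 256 + v) / 256 = p := by omega
    rw [this, h8]

theorem pvNatStep (p v : Nat) (hv : v < 256) : (p <<< 8) ||| v = p * 256 + v := by
  apply Nat.eq_of_testBit_eq
  intro i
  rw [Nat.testBit_or, Nat.testBit_shiftLeft, pvTB_sum p v i hv]
  by_cases h : i < 8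
  · simp only [h, if_true]
    have : ¬(i ≥ 8) := by omega
    simp [this]
  · have hvi : v.testBit i = false := Nat.testBit_lt_two_pow (by
      calc v < 256 := hv
      _ = 2 ^ 8 := by norm_num
      _ ≤ 2 ^ i := Nat.pow_le_pow_right (by norm_num) (by omega))
    have : i ≥ 8 := by omega
    simp [h, hvi, this]

theorem pvIntStep (p v : Nat) (hv : v < 256) :
    PySem.Int.bor ((p : Int) <<< (8 : Nat)) (v : Int) = ((p * 256 + v : Nat) : Int) := by
  rw [← Int.natCast_shiftLeft, PySem.Int.bor_natCast]
  rw [pvNatStep p v hv]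

theorem pvWEq (M : Nat) (hM : M < 4294967296) :
    PySem.Int.band (Int.not (M : Int)) 4294967295 = ((4294967295 - M : Nat) : Int) := by
  have hnot : Int.not (M : Int) = -(M : Int) - 1 := by
    show Int.not (Int.ofNat M) = _
    rw [Int.not]
    omega
  rw [hnot]
  unfold PySem.Int.band
  have h1 : ¬(0 ≤ -(M : Int) - 1) := by omega
  have h2 : (0 : Int) ≤ 4294967295 := by norm_num
  simp only [h1, h2, if_true, if_false]
  have h3 : (-(-(M:Int) - 1) - 1).toNat = M := by omega
  rw [h3]
  have h6 : Int.toNat 4294967295 = 4294967295 := by decide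
  rw [h6]
  have h4 : (4294967295 : Nat) &&& M = M := by
    have : (4294967295 : Nat) = 2 ^ 32 - 1 := by norm_num
    rw [this, Nat.land_comm, Nat.and_two_pow_sub_one_eq_mod]
    exact Nat.mod_eq_of_lt (by omega)
  rw [h4]

theorem pvTestCast (W : Nat) :
    (PySem.Int.band ((W : Nat) : Int) (((W : Nat) : Int) + 1) == 0) = decide (W &&& (W + 1) = 0) := by
  have h : ((W : Int) + 1) = ((W + 1 : Nat) : Int) := by push_cast; ring
  rw [h, PySem.Int.band_natCast]
  rw [show ((((W &&& (W+1) : Nat) : Int)) == 0) = decide (((W &&& (W+1) : Nat) : Int) = 0) from by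
    cases hb : (((W &&& (W+1) : Nat) : Int)) == 0 <;> simp_all]
  simp


def pvBools8 (n : Nat) : List Bool :=
  [n.testBit 7, n.testBit 6, n.testBit 5, n.testBit 4, n.testBit 3, n.testBit 2, n.testBit 1, n.testBit 0]

def pvCharOf (b : Bool) : Char := if b then '1' else '0'

def pvVal (bs : List Bool) : Nat := bs.foldl (fun a b => 2 * a + cond b 1 0) 0

theorem pvVal_foldl (bs : List Bool) : ∀ a : Nat,
    bs.foldl (fun a b => 2 * a + cond b 1 0) a = a * 2 ^ bs.length + pvVal bs := by
  induction bs with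
  | nil => intro a; simp [pvVal]
  | cons b t ih =>
    intro a
    simp only [List.foldl_cons, List.length_cons]
    rw [ih (2 * a + cond b 1 0)]
    have hv : pvVal (b :: t) = (cond b 1 0) * 2 ^ t.length + pvVal t := by
      simp only [pvVal, List.foldl_cons]
      simpa using ih (2 * 0 + cond b 1 0)
    rw [hv, pow_succ]
    cases b <;> simp <;> ring

theorem pvVal_cons (b : Bool) (t : List Bool) :
    pvVal (b :: t) = (cond b 1 0) * 2 ^ t.length + pvVal t := by
  simp only [pvVal, List.foldl_cons]
  simpa using pvVal_foldl t (2 * 0 + cond b 1 0)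

theorem pvVal_append (xs ys : List Bool) :
    pvVal (xs ++ ys) = pvVal xs * 2 ^ ys.length + pvVal ys := by
  simp only [pvVal, List.foldl_append]
  rw [pvVal_foldl ys (List.foldl _ 0 xs)]
  rfl

theorem pvVal_lt (bs : List Bool) : pvVal bs < 2 ^ bs.length := by
  induction bs with
  | nil => simp [pvVal]
  | cons b t ih =>
    rw [pvVal_cons]
    simp only [List.length_cons, pow_succ]
    cases b <;> simp <;> omega

theorem pvVal_inj (xs ys : List Bool) (hl : xs.length = ys.length)
    (hv : pvVal xs = pvVal ys) : xs = ys := by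
  induction xs generalizing ys with
  | nil => cases ys with
    | nil => rfl
    | cons b t => simp at hl
  | cons x xt ih =>
    cases ys with
    | nil => simp at hl
    | cons y yt =>
      simp only [List.length_cons] at hl
      rw [pvVal_cons, pvVal_cons] at hv
      have h1 := pvVal_lt xt
      have h2 := pvVal_lt yt
      have hlt : xt.length = yt.length := by omega
      rw [hlt] at h1 hv
      have hxy : x = y := by cases x <;> cases y <;> simp at hv ⊢ <;> omega
      subst hxy
      have : pvVal xt = pvVal yt := by cases x <;> simp at hv <;> omega
      rw [ih yt (by omega) this]

theorem pvVal_repl_true (k : Nat) : pvVal (List.replicate k true) = 2 ^ k - 1 := by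
  induction k with
  | zero => simp [pvVal]
  | succ n ih =>
    rw [List.replicate_succ, pvVal_cons, ih]
    simp [pow_succ]
    have : 1 ≤ 2 ^ n := Nat.one_le_two_pow
    omega

theorem pvVal_repl_false (j : Nat) : pvVal (List.replicate j false) = 0 := by
  induction j with
  | zero => simp [pvVal]
  | succ n ih => rw [List.replicate_succ, pvVal_cons, ih]; simp

theorem pvVal_ones (k j : Nat) :
    pvVal (List.replicate k true ++ List.replicate j false) = (2 ^ k - 1) * 2 ^ j := by
  rw [pvVal_append, pvVal_repl_true, pvVal_repl_false]
  simp

def pvNoFT (bs : List Bool) : Prop := ∀ i, ¬(bs[i]? = some false ∧ bs[i+1]? = some true)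

theorem pvNoFT_tail (x : Bool) (bs : List Bool) (h : pvNoFT (x :: bs)) : pvNoFT bs := by
  intro i ⟨h1, h2⟩
  exact h (i + 1) ⟨by simpa using h1, by simpa using h2⟩

theorem pvNoFT_allF (bs : List Bool) : pvNoFT (false :: bs) →
    false :: bs = List.replicate (bs.length + 1) false := by
  induction bs with
  | nil => intro _; rfl
  | cons b t ih =>
    intro h
    have hb : b = false := by
      by_contra hb
      have hb' : b = true := by cases b <;> simp_all
      exact h 0 ⟨by simp, by simp [hb']⟩
    subst hb
    have h2 := ih (pvNoFT_tail false (false :: t) h)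
    simp only [List.length_cons, List.replicate_succ] at h2 ⊢
    rw [show false :: false :: t = false :: (false :: t) from rfl, h2]
  
theorem pvNoFT_shape (bs : List Bool) (h : pvNoFT bs) :
    ∃ k, k ≤ bs.length ∧ bs = List.replicate k true ++ List.replicate (bs.length - k) false := by
  induction bs with
  | nil => exact ⟨0, by simp⟩
  | cons b t ih =>
    cases b with
    | true =>
      obtain ⟨k, hk, hsh⟩ := ih (pvNoFT_tail true t h)
      refine ⟨k + 1, by simp; omega, ?_⟩
      simp only [List.length_cons, List.replicate_succ]
      have : t.length + 1 - (k + 1) = t.length - k := by omega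
      rw [this]
      simpa using hsh
    | false =>
      refine ⟨0, by simp, ?_⟩
      have := pvNoFT_allF t h
      simpa using this

theorem pvRepl_getElem (k j i : Nat) :
    (List.replicate k true ++ List.replicate j false)[i]? =
      if i < k then some true else if i < k + j then some false else none := by
  by_cases h1 : i < k
  · rw [List.getElem?_append_left (by simpa using h1)]
    simp [h1]
  · rw [List.getElem?_append_right (by simpa using h1)]
    simp only [List.length_replicate, List.getElem?_replicate]
    split_ifs <;> simp_all <;> omega

theorem pvNoFT_ones (k j : Nat) : pvNoFT (List.replicate k true ++ List.replicate j false) := by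
  intro i ⟨h1, h2⟩
  rw [pvRepl_getElem] at h1 h2
  split_ifs at h1 h2 <;> simp_all <;> omega

-- w & (w+1) = 0 → w = 2^j - 1
theorem pvOnes_of_land (w : Nat) (h : w &&& (w + 1) = 0) : ∃ j, w = 2 ^ j - 1 := by
  induction w using Nat.strong_induction_on with
  | _ w ih =>
    rcases Nat.eq_zero_or_pos w with hz | hp
    · exact ⟨0, by omega⟩
    rcases Nat.even_or_odd w with he | ho
    · exfalso
      obtain ⟨u, hu⟩ := he
      have hne : ∃ t, w.testBit t = true := by
        by_contra hc
        push_neg at hc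
        have : w = 0 := Nat.eq_of_testBit_eq (fun i => by simp [hc i])
        omega
      obtain ⟨t, ht⟩ := hne
      have ht0 : t ≠ 0 := by
        intro h0
        subst h0
        rw [Nat.testBit_zero] at ht
        simp at ht
        omega
      obtain ⟨s, rfl⟩ : ∃ s, t = s + 1 := ⟨t - 1, by omega⟩
      have hsucc : (w + 1).testBit (s + 1) = w.testBit (s + 1) := by
        rw [Nat.testBit_succ, Nat.testBit_succ]
        have : (w + 1) / 2 = w / 2 := by omega
        rw [this]
      have : (w &&& (w + 1)).testBit (s + 1) = true := by
        rw [Nat.testBit_land, hsucc, ht]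
        simp
      rw [h] at this
      simp at this
    · obtain ⟨u, hu⟩ := ho
      have hland : u &&& (u + 1) = 0 := by
        apply Nat.eq_of_testBit_eq
        intro s
        rw [Nat.testBit_land]
        have h1 : u.testBit s = w.testBit (s + 1) := by
          rw [Nat.testBit_succ]
          have : w / 2 = u := by omega
          rw [this]
        have h2 : (u + 1).testBit s = (w + 1).testBit (s + 1) := by
          rw [Nat.testBit_succ]
          have : (w + 1) / 2 = u + 1 := by omega
          rw [this]
        rw [h1, h2, ← Nat.testBit_land, h]
        simp
      obtain ⟨j, hj⟩ := ih u (by omega) hland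
      have hpow : 1 ≤ 2 ^ j := Nat.one_le_two_pow
      exact ⟨j + 1, by rw [pow_succ]; omega⟩

-- (2^j - 1) & 2^j = 0
theorem pvLand_ones (j : Nat) : (2 ^ j - 1) &&& 2 ^ j = 0 := by
  apply Nat.eq_of_testBit_eq
  intro i
  rw [Nat.testBit_land, Nat.testBit_two_pow_sub_one, Nat.testBit_two_pow]
  by_cases h : i < j <;> simp_all <;> omega


theorem pvPrefix2 (x y : Char) (l : List Char) :
    [x, y] <+: l ↔ (l[0]? = some x ∧ l[1]? = some y) := by
  cases l with
  | nil => simp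
  | cons a t =>
    cases t with
    | nil => simp [List.cons_prefix_cons]
    | cons b u =>
      simp [List.cons_prefix_cons, List.nil_prefix]
      tauto

theorem pvIsIn2 (x y : Char) (cs : List Char) :
    PySem.Chars.isIn [x, y] cs = true ↔ ∃ i, cs[i]? = some x ∧ cs[i+1]? = some y := by
  rw [← PySem.Chars.exists_prefix_drop_iff_isIn]
  constructor
  · rintro ⟨j, hj⟩
    rw [pvPrefix2, List.getElem?_drop, List.getElem?_drop] at hj
    exact ⟨j, by simpa using hj.1, by simpa [Nat.add_comm] using hj.2⟩
  · rintro ⟨i, h1, h2⟩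
    refine ⟨i, ?_⟩
    rw [pvPrefix2, List.getElem?_drop, List.getElem?_drop]
    exact ⟨by simpa using h1, by simpa [Nat.add_comm] using h2⟩

theorem pvMapGet (bs : List Bool) (i : Nat) (c : Char) :
    (bs.map pvCharOf)[i]? = some c ↔ ∃ b, bs[i]? = some b ∧ pvCharOf b = c := by
  rw [List.getElem?_map]
  cases hb : bs[i]? with
  | none => simp
  | some b => simp

theorem pvIsIn_noFT (bs : List Bool) :
    PySem.Chars.isIn ['0', '1'] (bs.map pvCharOf) = false ↔ pvNoFT bs := by
  rw [← Bool.not_eq_true]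
  constructor
  · intro h i ⟨h1, h2⟩
    apply h
    rw [pvIsIn2]
    exact ⟨i, by rw [pvMapGet]; exact ⟨false, h1, rfl⟩,
              by rw [pvMapGet]; exact ⟨true, h2, rfl⟩⟩
  · intro h hIn
    rw [pvIsIn2] at hIn
    obtain ⟨i, h1, h2⟩ := hIn
    rw [pvMapGet] at h1 h2
    obtain ⟨b1, hb1, hc1⟩ := h1
    obtain ⟨b2, hb2, hc2⟩ := h2
    have e1 : b1 = false := by cases b1 <;> simp [pvCharOf] at hc1 ⊢
    have e2 : b2 = true := by cases b2 <;> simp [pvCharOf] at hc2 ⊢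
    subst e1; subst e2
    exact h i ⟨hb1, hb2⟩
set_option maxRecDepth 10000 in
theorem pvValBools8 : ∀ n : Nat, n < 256 → pvVal (pvBools8 n) = n := by decide

theorem pvCentral (n0 n1 n2 n3 : Nat) (h0 : n0 < 256) (h1 : n1 < 256) (h2 : n2 < 256) (h3 : n3 < 256) :
    (PySem.Chars.isIn ['0', '1']
        ((pvBools8 n0 ++ pvBools8 n1 ++ pvBools8 n2 ++ pvBools8 n3).map pvCharOf) = false)
      ↔ ((4294967295 - (((n0 * 256 + n1) * 256 + n2) * 256 + n3)) &&&
         ((4294967295 - (((n0 * 256 + n1) * 256 + n2) * 256 + n3)) + 1) = 0) := by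
  set M : Nat := ((n0 * 256 + n1) * 256 + n2) * 256 + n3 with hM
  set W : Nat := 4294967295 - M with hW
  set bs : List Bool := pvBools8 n0 ++ pvBools8 n1 ++ pvBools8 n2 ++ pvBools8 n3 with hbs
  have hMle : M ≤ 4294967295 := by omega
  have hlen : bs.length = 32 := by simp [hbs, pvBools8]
  have hval : pvVal bs = M := by
    simp only [hbs, pvVal_append]
    rw [pvValBools8 n0 h0, pvValBools8 n1 h1, pvValBools8 n2 h2, pvValBools8 n3 h3]
    simp [pvBools8, hM]
  rw [pvIsIn_noFT]
  constructor
  · intro h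
    obtain ⟨k, hk, hsh⟩ := pvNoFT_shape bs h
    rw [hlen] at hk hsh
    have hvs : pvVal bs = (2 ^ k - 1) * 2 ^ (32 - k) := by rw [hsh, pvVal_ones]
    have hpow : 2 ^ k * 2 ^ (32 - k) = 2 ^ 32 := by
      rw [← pow_add]; congr 1; omega
    have hone : 1 ≤ 2 ^ (32 - k) := Nat.one_le_two_pow
    have h32 : (2 : Nat) ^ 32 = 4294967296 := by norm_num
    have hMeq : M = 2 ^ 32 - 2 ^ (32 - k) := by
      rw [← hval, hvs]
      have hx : (2 ^ k - 1) * 2 ^ (32 - k) = 2 ^ k * 2 ^ (32 - k) - 2 ^ (32 - k) := by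
        rw [Nat.sub_mul]; simp
      rw [hx, hpow]
    have hle32 : 2 ^ (32 - k) ≤ 2 ^ 32 := Nat.pow_le_pow_right (by norm_num) (by omega)
    have hWeq : W = 2 ^ (32 - k) - 1 := by omega
    have hW1 : W + 1 = 2 ^ (32 - k) := by omega
    rw [hW1, hWeq]
    exact pvLand_ones (32 - k)
  · intro h
    obtain ⟨j, hj⟩ := pvOnes_of_land W h
    have h32 : (2 : Nat) ^ 32 = 4294967296 := by norm_num
    have hjle : j ≤ 32 := by
      by_contra hc
      have hy : 2 ^ 33 ≤ 2 ^ j := Nat.pow_le_pow_right (by norm_num) (by omega)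
      have h33 : (2 : Nat) ^ 33 = 8589934592 := by norm_num
      omega
    have hone : 1 ≤ 2 ^ j := Nat.one_le_two_pow
    have hle32 : 2 ^ j ≤ 2 ^ 32 := Nat.pow_le_pow_right (by norm_num) hjle
    have hMeq : M = 2 ^ 32 - 2 ^ j := by omega
    have hpow : 2 ^ (32 - j) * 2 ^ j = 2 ^ 32 := by
      rw [← pow_add]; congr 1; omega
    have hsh : bs = List.replicate (32 - j) true ++ List.replicate j false := by
      apply pvVal_inj
      · simp [hlen]; omega
      · rw [hval, pvVal_ones]
        have hx : (2 ^ (32 - j) - 1) * 2 ^ j = 2 ^ (32 - j) * 2 ^ j - 2 ^ j := by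
          rw [Nat.sub_mul]; simp
        rw [hx, hpow]
        omega
    rw [hsh]
    exact pvNoFT_ones (32 - j) j


set_option maxRecDepth 10000 in
theorem pvFmt8_eq : ∀ n : Nat, n < 256 → (pvFmt8 (n : Int)).toList = (pvBools8 n).map pvCharOf := by
  decide

theorem pvLen4 {α : Type} (l : List α) (h : l.length = 4) :
    ∃ a b c d : α, l = [a, b, c, d] := by
  rcases l with _ | ⟨a, _ | ⟨b, _ | ⟨c, _ | ⟨d, _ | ⟨e, t⟩⟩⟩⟩⟩ <;> simp_all

set_option maxRecDepth 20000 in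
theorem pvSuccess (v0 v1 v2 v3 : Int)
    (r0 : 0 ≤ v0 ∧ v0 ≤ 255) (r1 : 0 ≤ v1 ∧ v1 ≤ 255)
    (r2 : 0 ≤ v2 ∧ v2 ≤ 255) (r3 : 0 ≤ v3 ∧ v3 ≤ 255) :
    (if PySem.Str.isIn "01" (PySem.Str.join "" (List.map pvFmt8 [v0, v1, v2, v3]))
      then false else true)
    = (let m := PySem.Int.bor ((PySem.Int.bor ((PySem.Int.bor ((PySem.Int.bor (((0:Int)) <<< (8:Nat)) v0) <<< (8:Nat)) v1) <<< (8:Nat)) v2) <<< (8:Nat)) v3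
       let w := PySem.Int.band (Int.not m) 4294967295
       PySem.Int.band w (w + 1) == 0) := by
  set n0 := v0.toNat with hn0
  set n1 := v1.toNat with hn1
  set n2 := v2.toNat with hn2
  set n3 := v3.toNat with hn3
  have e0 : v0 = (n0 : Int) := by omega
  have e1 : v1 = (n1 : Int) := by omega
  have e2 : v2 = (n2 : Int) := by omega
  have e3 : v3 = (n3 : Int) := by omega
  have b0 : n0 < 256 := by omega
  have b1 : n1 < 256 := by omega
  have b2 : n2 < 256 := by omega
  have b3 : n3 < 256 := by omega
  rw [e0, e1, e2, e3]
  have hz : ((0 : Int)) = ((0 : Nat) : Int) := by norm_num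
  have s0 : PySem.Int.bor (((0:Int)) <<< (8:Nat)) (n0 : Int) = ((0 * 256 + n0 : Nat) : Int) := by
    rw [hz]; exact pvIntStep 0 n0 b0
  have s1 : PySem.Int.bor ((((0 * 256 + n0 : Nat) : Int)) <<< (8:Nat)) (n1 : Int)
      = (((0 * 256 + n0) * 256 + n1 : Nat) : Int) := pvIntStep _ n1 b1
  have s2 : PySem.Int.bor (((((0 * 256 + n0) * 256 + n1 : Nat) : Int)) <<< (8:Nat)) (n2 : Int)
      = ((((0 * 256 + n0) * 256 + n1) * 256 + n2 : Nat) : Int) := pvIntStep _ n2 b2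
  have s3 : PySem.Int.bor ((((((0 * 256 + n0) * 256 + n1) * 256 + n2 : Nat) : Int)) <<< (8:Nat)) (n3 : Int)
      = (((((0 * 256 + n0) * 256 + n1) * 256 + n2) * 256 + n3 : Nat) : Int) := pvIntStep _ n3 b3
  simp only [s0, s1, s2, s3]
  set M : Nat := (((0 * 256 + n0) * 256 + n1) * 256 + n2) * 256 + n3 with hMdef
  have hMlt : M < 4294967296 := by omega
  rw [pvWEq M hMlt, pvTestCast]
  have hjoin : (PySem.Str.join "" (List.map pvFmt8 [(n0:Int), (n1:Int), (n2:Int), (n3:Int)])).toList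
      = (pvBools8 n0 ++ pvBools8 n1 ++ pvBools8 n2 ++ pvBools8 n3).map pvCharOf := by
    rw [PySem.Str.toList_join]
    simp only [List.map_cons, List.map_nil]
    rw [PySem.Chars.join_cons_cons, PySem.Chars.join_cons_cons, PySem.Chars.join_cons_cons,
        PySem.Chars.join_singleton]
    rw [pvFmt8_eq n0 b0, pvFmt8_eq n1 b1, pvFmt8_eq n2 b2, pvFmt8_eq n3 b3]
    simp [List.map_append]
  have h01 : "01".toList = ['0', '1'] := by decide
  have hIs : PySem.Str.isIn "01" (PySem.Str.join "" (List.map pvFmt8 [(n0:Int), (n1:Int), (n2:Int), (n3:Int)]))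
      = PySem.Chars.isIn ['0', '1'] ((pvBools8 n0 ++ pvBools8 n1 ++ pvBools8 n2 ++ pvBools8 n3).map pvCharOf) := by
    rw [PySem.Str.isIn_eq, h01, hjoin]
  rw [hIs]
  have hcent := pvCentral n0 n1 n2 n3 b0 b1 b2 b3
  have hMeq : (((n0 * 256 + n1) * 256 + n2) * 256 + n3) = M := by omega
  rw [hMeq] at hcent
  cases hIn : PySem.Chars.isIn ['0', '1'] ((pvBools8 n0 ++ pvBools8 n1 ++ pvBools8 n2 ++ pvBools8 n3).map pvCharOf) with
  | true =>
    simp only [if_true]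
    have hne : ¬(4294967295 - M &&& (4294967295 - M) + 1 = 0) := by
      intro hc
      have hx := hcent.mpr hc
      rw [hIn] at hx
      exact Bool.noConfusion hx
    symm
    rw [decide_eq_false_iff_not]
    exact hne
  | false =>
    simp only [Bool.false_eq_true, if_false]
    have hy := hcent.mp hIn
    symm
    rw [decide_eq_true_iff]
    exact hy

theorem validate_netmask_main (netmask : String) :
    validate_netmask netmask = validate_netmask_alt netmask := by
  unfold validate_netmask validate_netmask_alt
  cases hs : PySem.Str.split? netmask "." with
  | none => rfl
  | some octets =>
    by_cases hlen : octets.length ≠ 4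
    · simp [hlen]
    · have hlen4 : octets.length = 4 := by omega
      obtain ⟨a, b, c, d, rfl⟩ := pvLen4 octets hlen4
      simp only [hlen4, ne_eq, not_true_eq_false, if_false]
      rcases hA : PySem.Int.ofStr? a with _ | v0
      · simp [pvARange, pvBAcc, hA]
      by_cases h0 : ¬(0 ≤ v0 ∧ v0 ≤ 255)
      · simp [pvARange, pvBAcc, hA, h0]
      rcases hB : PySem.Int.ofStr? b with _ | v1
      · simp [pvARange, pvBAcc, hA, hB, h0]
      by_cases h1 : ¬(0 ≤ v1 ∧ v1 ≤ 255)
      · simp [pvARange, pvBAcc, hA, hB, h0, h1]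
      rcases hC : PySem.Int.ofStr? c with _ | v2
      · simp [pvARange, pvBAcc, hA, hB, hC, h0, h1]
      by_cases h2 : ¬(0 ≤ v2 ∧ v2 ≤ 255)
      · simp [pvARange, pvBAcc, hA, hB, hC, h0, h1, h2]
      rcases hD : PySem.Int.ofStr? d with _ | v3
      · simp [pvARange, pvBAcc, hA, hB, hC, hD, h0, h1, h2]
      by_cases h3 : ¬(0 ≤ v3 ∧ v3 ≤ 255)
      · simp [pvARange, pvBAcc, hA, hB, hC, hD, h0, h1, h2, h3]
      push_neg at h0 h1 h2 h3
      simp only [pvARange, pvBAcc, hA, hB, hC, hD, List.mapM_cons, List.mapM_nil]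
      have hr0 : ¬¬(0 ≤ v0 ∧ v0 ≤ 255) := by tauto
      have hr1 : ¬¬(0 ≤ v1 ∧ v1 ≤ 255) := by tauto
      have hr2 : ¬¬(0 ≤ v2 ∧ v2 ≤ 255) := by tauto
      have hr3 : ¬¬(0 ≤ v3 ∧ v3 ≤ 255) := by tauto
      simp only [hr0, hr1, hr2, hr3, if_false]
      exact pvSuccess v0 v1 v2 v3 h0 h1 h2 h3

-- ===== VERDICT (by name: the statement is the Claim_ definition above) =====
theorem validate_netmask_spec : Claim_equal_validate_netmask := by
  intro netmask _
  unfold Spec_validate_netmask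
  exact validate_netmask_main netmask
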